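-- pv_equiv track=rewrite | github.com/MykytaShashenok/Shashenok_FI-93_labs | SROM_Lab_2.py | reverse_convert_hex_to_string
-- ===== SOURCE A (Python) =====
-- def reverse_convert_hex_to_string(number):
--     string = map(hex,number)
--     my_list_1 = list(string)
--     for i in range(len(my_list_1)):
--         my_list_1[i] = my_list_1[i].replace('0x','')
--     str_1 = ''.join(my_list_1)
--     str_2 = str_1[::-1]
--    # while str_2[0] == '0':
--       #  str_2[0] = str_2[0].replace('0','')
--     return str_2
-- ===== SOURCE B (Python) =====
-- def reverse_convert_hex_to_string(number):
--     pieces = [format(x, 'x') for x in number]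
--     return ''.join(p[::-1] for p in reversed(pieces))
-- ===== Notes on version B (the rewrite author's own statement) =====
-- stated objective: simpler
-- what changed: B formats each element directly as bare hex with format(x,'x') (no '0x' stripping) and builds the reversed result by walking the list backwards and appending each piece reversed, instead of joining forward and reversing the whole string.
import Mathlib
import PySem

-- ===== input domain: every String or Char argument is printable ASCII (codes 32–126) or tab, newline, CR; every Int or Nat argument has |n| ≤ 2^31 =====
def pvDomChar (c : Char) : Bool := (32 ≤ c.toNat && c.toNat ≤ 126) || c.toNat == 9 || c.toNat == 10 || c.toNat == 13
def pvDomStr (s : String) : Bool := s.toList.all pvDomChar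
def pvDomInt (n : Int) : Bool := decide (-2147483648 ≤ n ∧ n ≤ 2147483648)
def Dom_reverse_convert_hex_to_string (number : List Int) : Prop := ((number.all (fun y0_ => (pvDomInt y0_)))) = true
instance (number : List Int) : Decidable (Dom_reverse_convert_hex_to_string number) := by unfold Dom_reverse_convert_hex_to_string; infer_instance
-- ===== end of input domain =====

-- B builds the reversed concatenation directly (bare hex per element, walked backwards, each piece reversed)
-- instead of joining '0x'-stripped hex pieces forward and reversing the joined string; objective: simpler.

-- hex is not in PySem: hand-ported, exact for the pieces used here.
-- lowercase hex digit for d < 16, as CPython prints it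
def pvHexDigitChar (d : Nat) : Char :=
  if d < 10 then Char.ofNat (48 + d) else Char.ofNat (87 + d)

-- most-significant-first hex digits of m; [] for 0
def pvHexDigitsCore (m : Nat) : List Char :=
  if h : m = 0 then []
  else pvHexDigitsCore (m / 16) ++ [pvHexDigitChar (m % 16)]
decreasing_by exact Nat.div_lt_self (Nat.pos_of_ne_zero h) (by norm_num)

-- hex digits of m, with the special case hex(0) = '0'
def pvHexDigits (m : Nat) : List Char :=
  if m = 0 then ['0'] else pvHexDigitsCore m

-- ===== PORT A =====
-- hex(n): '-' for negatives, then '0x', then the digits of |n|  (exact hand port of CPython's hex)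
def pvPyHexChars (n : Int) : List Char :=
  (if n < 0 then ['-'] else []) ++ ['0', 'x'] ++ pvHexDigits n.natAbs

def reverse_convert_hex_to_string (number : List Int) : String :=
  -- string = map(hex, number); my_list_1 = list(string)
  let my_list_1 : List (List Char) := number.map (fun n => pvPyHexChars n)
  -- for i in range(len(my_list_1)): my_list_1[i] = my_list_1[i].replace('0x','')
  let my_list_1 := my_list_1.map (fun s => PySem.Chars.replace s ['0', 'x'] [])
  -- str_1 = ''.join(my_list_1)
  let str_1 := PySem.Chars.join [] my_list_1
  -- str_2 = str_1[::-1]  (slice with step -1; total here, some-valued since step ≠ 0)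
  String.mk ((PySem.List.slice? str_1 none none (-1)).getD [])

-- ===== PORT B =====
-- format(x, 'x'): bare lowercase hex, '-' in front for negatives (exact hand port)
def pvBareHexChars (n : Int) : List Char :=
  (if n < 0 then ['-'] else []) ++ pvHexDigits n.natAbs

def reverse_convert_hex_to_string_alt (number : List Int) : String :=
  -- pieces = [format(x, 'x') for x in number]
  let pieces : List (List Char) := number.map (fun n => pvBareHexChars n)
  -- ''.join(p[::-1] for p in reversed(pieces)):  ''-join = flatten, p[::-1] = p.reverse
  String.mk ((pieces.reverse.map List.reverse).flatten)

-- ===== PRECONDITION & SPEC =====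
def Spec_reverse_convert_hex_to_string (number : List Int) (out : String) : Prop := out = reverse_convert_hex_to_string_alt number
instance (number : List Int) (out : String) : Decidable (Spec_reverse_convert_hex_to_string number out) := by unfold Spec_reverse_convert_hex_to_string; infer_instance

-- ===== CLAIM (what is proved, stated in full; the proofs are below) =====
def Claim_equal_reverse_convert_hex_to_string : Prop := ∀ (number : List Int), Dom_reverse_convert_hex_to_string number → Spec_reverse_convert_hex_to_string number (reverse_convert_hex_to_string number)

-- ===== LEMMAS AND PROOFS =====

-- replace's worker leaves a list untouched when it contains no 'x' (so no '0x' can occur)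
theorem pv_go_no_x (fuel : Nat) (l acc : List Char) (h : 'x' ∉ l) (hf : l.length ≤ fuel) :
    PySem.Chars.replace.go ['0', 'x'] [] fuel l acc = acc.reverse ++ l := by
  induction fuel generalizing l acc with
  | zero =>
    cases l with
    | nil => simp [PySem.Chars.replace.go]
    | cons c t => simp at hf
  | succ fuel ih =>
    cases l with
    | nil => simp [PySem.Chars.replace.go]
    | cons c t =>
      rw [PySem.Chars.replace.go]
      have hpre : List.isPrefixOf ['0', 'x'] (c :: t) = false := by
        cases t with
        | nil => simp [List.isPrefixOf]
        | cons c' t' =>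
          by_cases h0 : c = '0' <;> by_cases hx : c' = 'x' <;>
            simp_all [List.isPrefixOf]
      rw [if_neg (by simp [hpre])]
      rw [ih t (c :: acc) (fun hm => h (List.mem_cons_of_mem _ hm)) (by simpa using Nat.le_of_succ_le_succ hf)]
      simp

theorem pv_no_x_core (m : Nat) : 'x' ∉ pvHexDigitsCore m := by
  induction m using Nat.strong_induction_on with
  | _ m ih =>
    rw [pvHexDigitsCore]
    split
    · simp
    · rename_i h
      intro hm
      rcases List.mem_append.mp hm with h1 | h2
      · exact ih (m / 16) (Nat.div_lt_self (Nat.pos_of_ne_zero h) (by norm_num)) h1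
      · have h16 : m % 16 < 16 := Nat.mod_lt _ (by norm_num)
        have hx : 'x' = pvHexDigitChar (m % 16) := by simpa using h2
        revert hx
        interval_cases h' : (m % 16) <;> decide

theorem pv_no_x (m : Nat) : 'x' ∉ pvHexDigits m := by
  unfold pvHexDigits
  split
  · decide
  · exact pv_no_x_core m

-- replacing '0x' in hex(n) yields the bare hex string
theorem pv_replace_hex (n : Int) :
    PySem.Chars.replace (pvPyHexChars n) ['0', 'x'] [] = pvBareHexChars n := by
  have hx := pv_no_x n.natAbs
  by_cases hn : n < 0
  · simp only [pvPyHexChars, pvBareHexChars, if_pos hn, List.cons_append, List.nil_append,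
      PySem.Chars.replace, List.isEmpty_iff, List.append_assoc]
    rw [if_neg (by simp)]
    rw [show ('-' :: '0' :: 'x' :: pvHexDigits n.natAbs).length
          = (pvHexDigits n.natAbs).length + 3 from by simp]
    rw [PySem.Chars.replace.go]
    rw [if_neg (by simp [List.isPrefixOf])]
    rw [PySem.Chars.replace.go]
    rw [if_pos (by simp [List.isPrefixOf])]
    simp only [List.drop_succ_cons, List.drop_zero, List.reverse_nil, List.append_nil]
    rw [pv_go_no_x _ _ _ (by simpa using hx) (by simp)]
    simp
  · simp only [pvPyHexChars, pvBareHexChars, if_neg hn, List.cons_append, List.nil_append,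
      PySem.Chars.replace, List.isEmpty_iff, List.append_assoc]
    rw [if_neg (by simp)]
    rw [show ('0' :: 'x' :: pvHexDigits n.natAbs).length
          = (pvHexDigits n.natAbs).length + 2 from by simp]
    rw [PySem.Chars.replace.go]
    rw [if_pos (by simp [List.isPrefixOf])]
    simp only [List.drop_succ_cons, List.drop_zero, List.reverse_nil, List.append_nil]
    rw [pv_go_no_x _ _ _ (by simpa using hx) (by simp)]
    simp

-- ''.join = flatten
theorem pv_join_nil (parts : List (List Char)) :
    PySem.Chars.join [] parts = parts.flatten := by
  induction parts with
  | nil => rfl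
  | cons p t ih =>
    cases t with
    | nil => simp [PySem.Chars.join, List.intercalate]
    | cons q t' =>
      simp only [PySem.Chars.join, List.intercalate] at ih ⊢
      simp [List.intersperse, List.flatten]
      simpa [List.intercalate] using ih

-- ===== VERDICT (by name: the statement is the Claim_ definition above) =====
theorem reverse_convert_hex_to_string_spec : Claim_equal_reverse_convert_hex_to_string := by
  intro number _
  unfold Spec_reverse_convert_hex_to_string reverse_convert_hex_to_string reverse_convert_hex_to_string_alt
  simp only [List.map_map, Function.comp_def]
  rw [PySem.List.slice?_none_none_neg_one]
  simp only [Option.getD_some]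
  congr 1
  rw [pv_join_nil]
  have : (number.map fun n => PySem.Chars.replace (pvPyHexChars n) ['0', 'x'] []) =
      number.map pvBareHexChars := List.map_congr_left (fun n _ => pv_replace_hex n)
  rw [this, List.reverse_flatten, List.map_reverse]
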